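-- pv_equiv track=rewrite | github.com/Reidskar/NEXO_SOBERANO | scripts/app_inventory_sync.py | risk_tags
-- ===== SOURCE A (Python) =====
-- from typing import Dict, List, Any
--
-- def risk_tags(packages: List[str]) -> Dict[str, List[str]]:
--     keys = {
--         "remote_control": ["anydesk", "airdroid", "teamviewer", "remote"],
--         "vpn": ["vpn", "wireguard", "tailscale", "proton"],
--         "finance_crypto": ["bank", "wallet", "crypto", "binance", "coin", "xtb"],
--         "social_heavy": ["instagram", "telegram", "facebook", "tiktok", "instapro"],
--     }
--     out: Dict[str, List[str]] = {}
--     for category, words in keys.items():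
--         found = [p for p in packages if any(w in p.lower() for w in words)]
--         if found:
--             out[category] = found
--     return out
-- ===== SOURCE B (Python) =====
-- from typing import Dict, List
--
-- def risk_tags(packages: List[str]) -> Dict[str, List[str]]:
--     # Single pass: lower each package once and route it to per-category accumulators.
--     rc: List[str] = []
--     vp: List[str] = []
--     fc: List[str] = []
--     so: List[str] = []
--     for p in packages:
--         pl = p.lower()
--         if "anydesk" in pl or "airdroid" in pl or "teamviewer" in pl or "remote" in pl:
--             rc.append(p)
--         if "vpn" in pl or "wireguard" in pl or "tailscale" in pl or "proton" in pl:
--             vp.append(p)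
--         if "bank" in pl or "wallet" in pl or "crypto" in pl or "binance" in pl or "coin" in pl or "xtb" in pl:
--             fc.append(p)
--         if "instagram" in pl or "telegram" in pl or "facebook" in pl or "tiktok" in pl or "instapro" in pl:
--             so.append(p)
--     out: Dict[str, List[str]] = {}
--     if rc:
--         out["remote_control"] = rc
--     if vp:
--         out["vpn"] = vp
--     if fc:
--         out["finance_crypto"] = fc
--     if so:
--         out["social_heavy"] = so
--     return out
-- ===== Notes on version B (the rewrite author's own statement) =====
-- stated objective: alternative
-- what changed: One pass over packages that lowers each package once and routes it to four per-category accumulator lists, instead of four separate full scans each re-lowering the package for every word; the output dict is then assembled from the non-empty accumulators in the original key order.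
import Mathlib
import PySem

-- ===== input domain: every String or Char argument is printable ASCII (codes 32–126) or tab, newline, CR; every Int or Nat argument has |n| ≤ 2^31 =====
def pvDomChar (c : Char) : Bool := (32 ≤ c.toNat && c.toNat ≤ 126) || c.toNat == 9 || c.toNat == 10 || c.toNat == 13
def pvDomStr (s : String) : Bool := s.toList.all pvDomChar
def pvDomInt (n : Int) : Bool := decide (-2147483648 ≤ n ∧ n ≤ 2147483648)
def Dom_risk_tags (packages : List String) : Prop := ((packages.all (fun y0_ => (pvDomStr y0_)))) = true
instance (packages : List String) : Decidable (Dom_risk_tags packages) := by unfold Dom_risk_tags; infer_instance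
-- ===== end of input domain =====

-- B replaces A's four per-category scans (re-lowering each package per word) by one pass
-- over packages that lowers each package once and routes it into per-category accumulators
-- (objective: alternative decomposition).

-- ===== PORT A =====
def riskKeys : List (String × List String) :=
  [("remote_control", ["anydesk", "airdroid", "teamviewer", "remote"]),
   ("vpn", ["vpn", "wireguard", "tailscale", "proton"]),
   ("finance_crypto", ["bank", "wallet", "crypto", "binance", "coin", "xtb"]),
   ("social_heavy", ["instagram", "telegram", "facebook", "tiktok", "instapro"])]

def risk_tags (packages : List String) : List (String × List String) :=
  (riskKeys.foldl
    (fun (out : PySem.Dict String (List String)) cw =>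
      let found := packages.filter (fun p => cw.2.any (fun w => PySem.Str.isIn w (PySem.Str.lower p)))
      if found.isEmpty then out else out.insert cw.1 found)
    PySem.Dict.empty).items

-- ===== PORT B =====
def riskStep (acc : List String × List String × List String × List String) (p : String) :
    List String × List String × List String × List String :=
  let pl := PySem.Str.lower p
  let acc :=
    if PySem.Str.isIn "anydesk" pl || PySem.Str.isIn "airdroid" pl ||
       PySem.Str.isIn "teamviewer" pl || PySem.Str.isIn "remote" pl
    then (acc.1 ++ [p], acc.2.1, acc.2.2.1, acc.2.2.2) else acc
  let acc :=
    if PySem.Str.isIn "vpn" pl || PySem.Str.isIn "wireguard" pl ||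
       PySem.Str.isIn "tailscale" pl || PySem.Str.isIn "proton" pl
    then (acc.1, acc.2.1 ++ [p], acc.2.2.1, acc.2.2.2) else acc
  let acc :=
    if PySem.Str.isIn "bank" pl || PySem.Str.isIn "wallet" pl || PySem.Str.isIn "crypto" pl ||
       PySem.Str.isIn "binance" pl || PySem.Str.isIn "coin" pl || PySem.Str.isIn "xtb" pl
    then (acc.1, acc.2.1, acc.2.2.1 ++ [p], acc.2.2.2) else acc
  if PySem.Str.isIn "instagram" pl || PySem.Str.isIn "telegram" pl ||
     PySem.Str.isIn "facebook" pl || PySem.Str.isIn "tiktok" pl || PySem.Str.isIn "instapro" pl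
  then (acc.1, acc.2.1, acc.2.2.1, acc.2.2.2 ++ [p]) else acc

def risk_tags_alt (packages : List String) : List (String × List String) :=
  let acc := packages.foldl riskStep ([], [], [], [])
  let rc := acc.1
  let vp := acc.2.1
  let fc := acc.2.2.1
  let so := acc.2.2.2
  let out : PySem.Dict String (List String) := PySem.Dict.empty
  let out := if rc.isEmpty then out else out.insert "remote_control" rc
  let out := if vp.isEmpty then out else out.insert "vpn" vp
  let out := if fc.isEmpty then out else out.insert "finance_crypto" fc
  let out := if so.isEmpty then out else out.insert "social_heavy" so
  out.items

-- ===== PRECONDITION & SPEC =====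
def Spec_risk_tags (packages : List String) (out : List (String × List String)) : Prop := out = risk_tags_alt packages
instance (packages : List String) (out : List (String × List String)) : Decidable (Spec_risk_tags packages out) := by unfold Spec_risk_tags; infer_instance

-- ===== CLAIM (what is proved, stated in full; the proofs are below) =====
def Claim_equal_risk_tags : Prop := ∀ (packages : List String), Dom_risk_tags packages → Spec_risk_tags packages (risk_tags packages)

-- ===== LEMMAS AND PROOFS =====

def pvPred (ws : List String) (p : String) : Bool :=
  ws.any (fun w => PySem.Str.isIn w (PySem.Str.lower p))

lemma riskStep_eq (a b c d : List String) (p : String) :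
    riskStep (a, b, c, d) p =
      (a ++ (if pvPred ["anydesk", "airdroid", "teamviewer", "remote"] p then [p] else []),
       b ++ (if pvPred ["vpn", "wireguard", "tailscale", "proton"] p then [p] else []),
       c ++ (if pvPred ["bank", "wallet", "crypto", "binance", "coin", "xtb"] p then [p] else []),
       d ++ (if pvPred ["instagram", "telegram", "facebook", "tiktok", "instapro"] p then [p] else [])) := by
  simp only [riskStep, pvPred, List.any_cons, List.any_nil, Bool.or_false, Bool.or_assoc]
  split_ifs <;> simp

lemma riskStep_foldl (packages : List String) (a b c d : List String) :
    packages.foldl riskStep (a, b, c, d) =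
      (a ++ packages.filter (pvPred ["anydesk", "airdroid", "teamviewer", "remote"]),
       b ++ packages.filter (pvPred ["vpn", "wireguard", "tailscale", "proton"]),
       c ++ packages.filter (pvPred ["bank", "wallet", "crypto", "binance", "coin", "xtb"]),
       d ++ packages.filter (pvPred ["instagram", "telegram", "facebook", "tiktok", "instapro"])) := by
  induction packages generalizing a b c d with
  | nil => simp
  | cons p ps ih =>
    rw [List.foldl_cons, riskStep_eq, ih]
    simp only [List.filter_cons]
    split_ifs <;> simp

theorem risk_tags_spec : Claim_equal_risk_tags := by
  intro packages _
  unfold Spec_risk_tags risk_tags risk_tags_alt riskKeys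
  rw [riskStep_foldl]
  simp only [List.foldl_cons, List.foldl_nil, List.nil_append]
  rfl
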